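-- pv_equiv track=rewrite | github.com/DewPeaceTigers/AlgorithmStudy | weeks/week_53/PG_142085/minji.py | solution
-- ===== SOURCE A (Python) =====
-- import heapq
--
-- def solution(n, k, enemy):
--     answer = 0
--     heap = []
--     total = 0
--     for e in enemy:
--         total += e
--         heapq.heappush(heap, -e)
--
--         if total > n:
--             if k == 0:
--                 break
--             k -= 1
--             total += heapq.heappop(heap)
--         answer += 1
--     return answer
-- ===== SOURCE B (Python) =====
-- def solution(n, k, enemy):
--     # Same greedy strategy, no heap: keep the fought enemies in a plain list and,
--     # when over budget, drop the biggest one via max()/remove(); the enumerate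
--     # index doubles as the answer on early exit.
--     kept = []
--     total = 0
--     for i, e in enumerate(enemy):
--         kept.append(e)
--         total += e
--         if total > n:
--             if k == 0:
--                 return i
--             k -= 1
--             big = max(kept)
--             kept.remove(big)
--             total -= big
--     return len(enemy)
-- ===== Notes on version B (the rewrite author's own statement) =====
-- stated objective: simpler
-- what changed: Kept the greedy strategy but dropped the heapq-of-negated-values machinery: B keeps the fought enemies in a plain list, removes the biggest via max()/remove() only when over budget, and uses the enumerate index as the early-exit answer instead of a separate counter.
import Mathlib
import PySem

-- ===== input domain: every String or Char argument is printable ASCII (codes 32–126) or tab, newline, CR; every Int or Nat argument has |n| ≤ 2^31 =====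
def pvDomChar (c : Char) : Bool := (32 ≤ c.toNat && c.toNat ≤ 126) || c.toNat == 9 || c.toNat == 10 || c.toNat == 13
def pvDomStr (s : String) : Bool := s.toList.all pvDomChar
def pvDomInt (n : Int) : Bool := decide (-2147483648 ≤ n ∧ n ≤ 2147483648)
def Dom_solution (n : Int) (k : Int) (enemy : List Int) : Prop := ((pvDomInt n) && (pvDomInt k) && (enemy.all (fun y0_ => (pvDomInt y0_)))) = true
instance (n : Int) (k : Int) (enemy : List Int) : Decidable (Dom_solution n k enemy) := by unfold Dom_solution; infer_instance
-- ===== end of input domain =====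

-- B keeps A's greedy strategy but replaces the heapq-of-negated-values bookkeeping by a plain
-- kept-list with max()/remove() and an enumerate-index early return (simpler, no speed claim).


-- ===== PORT A =====
-- heapq is modelled by its priority-queue contract: the pool is kept in ascending order,
-- heappush inserts keeping that order, heappop removes and returns the minimum.
def heapPush (x : Int) : List Int → List Int
  | [] => [x]
  | a :: t => if x ≤ a then x :: a :: t else a :: heapPush x t

def heapPop : List Int → Int × List Int
  | [] => (0, [])          -- never reached: A pops only right after a push
  | a :: t => (a, t)

def solutionLoop (n : Int) : Int → List Int → Int → Int → List Int → Int
  | _, _, _, answer, [] => answer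
  | k, heap, total, answer, e :: rest =>
    let total1 := total + e
    let heap1 := heapPush (-e) heap
    if n < total1 then
      if k = 0 then answer
      else
        let p := heapPop heap1
        solutionLoop n (k - 1) p.2 (total1 + p.1) (answer + 1) rest
    else
      solutionLoop n k heap1 total1 (answer + 1) rest

def solution (n : Int) (k : Int) (enemy : List Int) : Int :=
  solutionLoop n k [] 0 0 enemy

-- ===== PORT B =====
def removeOnce (kept : List Int) (big : Int) : List Int :=
  match PySem.List.remove? kept big with
  | some l => l
  | none => kept           -- never reached: big is max(kept), hence a member

def altLoop (n : Int) (enemyLen : Int) : Int → List Int → Int → List (Int × Int) → Int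
  | _, _, _, [] => enemyLen
  | k, kept, total, (i, e) :: rest =>
    let kept1 := kept ++ [e]
    let total1 := total + e
    if n < total1 then
      if k = 0 then i
      else
        let big := (PySem.List.max? kept1 (fun y => y)).getD 0
        altLoop n enemyLen (k - 1) (removeOnce kept1 big) (total1 - big) rest
    else
      altLoop n enemyLen k kept1 total1 rest

def solution_alt (n : Int) (k : Int) (enemy : List Int) : Int :=
  altLoop n (enemy.length : Int) k [] 0 (PySem.List.enumerate enemy)

-- ===== PRECONDITION & SPEC =====
def Spec_solution (n : Int) (k : Int) (enemy : List Int) (out : Int) : Prop := out = solution_alt n k enemy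
instance (n : Int) (k : Int) (enemy : List Int) (out : Int) : Decidable (Spec_solution n k enemy out) := by unfold Spec_solution; infer_instance

-- ===== CLAIM (what is proved, stated in full; the proofs are below) =====
def Claim_equal_solution : Prop := ∀ (n : Int) (k : Int) (enemy : List Int), Dom_solution n k enemy → Spec_solution n k enemy (solution n k enemy)

-- ===== LEMMAS AND PROOFS =====
theorem heapPush_perm (x : Int) (l : List Int) : (heapPush x l).Perm (x :: l) := by
  induction l with
  | nil => simp [heapPush]
  | cons a t ih =>
    simp only [heapPush]
    split
    · exact List.Perm.refl _
    · exact (List.Perm.cons a ih).trans (List.Perm.swap _ _ _)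

theorem mem_heapPush (x y : Int) (l : List Int) : y ∈ heapPush x l ↔ y = x ∨ y ∈ l := by
  rw [(heapPush_perm x l).mem_iff]; simp

theorem heapPush_pairwise (x : Int) (l : List Int) (h : l.Pairwise (· ≤ ·)) :
    (heapPush x l).Pairwise (· ≤ ·) := by
  induction l with
  | nil => simp [heapPush]
  | cons a t ih =>
    rcases List.pairwise_cons.1 h with ⟨ha, ht⟩
    simp only [heapPush]
    split
    · rename_i hxa
      refine List.pairwise_cons.2 ⟨?_, h⟩
      intro b hb
      rcases hb with _ | hb
      · exact hxa
      · exact le_trans hxa (ha _ (by assumption))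
    · rename_i hxa
      refine List.pairwise_cons.2 ⟨?_, ih ht⟩
      intro b hb
      rcases (mem_heapPush x b t).1 hb with rfl | hb
      · omega
      · exact ha _ hb

theorem heapPush_ne_nil (x : Int) (l : List Int) : heapPush x l ≠ [] := by
  cases l <;> simp [heapPush] <;> split <;> simp

-- the state relation: A's heap holds exactly the negations of B's kept list
theorem loops_eq (n : Int) : ∀ (rest : List Int) (k total answer : Int) (heap kept : List Int),
    heap.Pairwise (· ≤ ·) →
    heap.Perm (kept.map (fun x => -x)) →
    solutionLoop n k heap total answer rest
      = altLoop n (answer + (rest.length : Int)) k kept total (PySem.List.enumerate rest answer) := by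
  intro rest
  induction rest with
  | nil =>
    intro k total answer heap kept _ _
    simp [solutionLoop, altLoop, PySem.List.enumerate_nil]
  | cons e rest' ih =>
    intro k total answer heap kept hsorted hperm
    rw [PySem.List.enumerate_cons]
    simp only [solutionLoop, altLoop]
    have hperm1 : (heapPush (-e) heap).Perm ((kept ++ [e]).map (fun x => -x)) := by
      refine (heapPush_perm (-e) heap).trans ?_
      have h1 : ((kept ++ [e]).map (fun x : Int => -x)) = kept.map (fun x : Int => -x) ++ [-e] := by
        simp
      rw [h1]
      exact (hperm.cons (-e)).trans (by
        simpa using (List.perm_middle (a := -e)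
          (l₁ := kept.map (fun x : Int => -x)) (l₂ := ([] : List Int))).symm)
    have hsorted1 : (heapPush (-e) heap).Pairwise (· ≤ ·) := heapPush_pairwise _ _ hsorted
    by_cases hover : n < total + e
    · rw [if_pos hover, if_pos hover]
      by_cases hk0 : k = 0
      · rw [if_pos hk0, if_pos hk0]
      · rw [if_neg hk0, if_neg hk0]
        obtain ⟨m, hr1, hheap1⟩ : ∃ m hr1, heapPush (-e) heap = m :: hr1 := by
          cases h : heapPush (-e) heap with
          | nil => exact absurd h (heapPush_ne_nil _ _)
          | cons a b => exact ⟨a, b, rfl⟩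
        rw [hheap1]
        simp only [heapPop]
        rw [hheap1] at hperm1 hsorted1
        have hmmin : ∀ a ∈ hr1, m ≤ a := (List.pairwise_cons.1 hsorted1).1
        have hsr1 : hr1.Pairwise (· ≤ ·) := (List.pairwise_cons.1 hsorted1).2
        -- B's max of kept1
        obtain ⟨M, hM⟩ : ∃ M, PySem.List.max? (kept ++ [e]) (fun y => y) = some M := by
          cases h : PySem.List.max? (kept ++ [e]) (fun y => y) with
          | none => exact absurd ((PySem.List.max?_eq_none_iff _ _).1 h) (by simp)
          | some a => exact ⟨a, rfl⟩
        have hMmem : M ∈ kept ++ [e] := PySem.List.max?_mem hM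
        have hMmax : ∀ y ∈ kept ++ [e], y ≤ M := by
          have := PySem.List.max?_isMax hM
          simpa using this
        -- the popped minimum of the negations is the negation of B's maximum
        have hmM : m = -M := by
          have h1 : m ≤ -M := by
            have : -M ∈ m :: hr1 := hperm1.mem_iff.2 (by
              simp only [List.mem_map]
              exact ⟨M, hMmem, rfl⟩)
            rcases List.mem_cons.1 this with heq | hmem
            · omega
            · exact hmmin _ hmem
          have h2 : -M ≤ m := by
            have hm : m ∈ (kept ++ [e]).map (fun x : Int => -x) :=
              hperm1.subset List.mem_cons_self
            obtain ⟨y, hy, hym⟩ := List.mem_map.1 hm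
            have := hMmax y hy
            omega
          omega
        have hrm : removeOnce (kept ++ [e]) M = (kept ++ [e]).erase M := by
          rw [removeOnce, PySem.List.remove?_eq_some_erase _ _ hMmem]
        have hperm2 : hr1.Perm (((kept ++ [e]).erase M).map (fun x => -x)) := by
          have h1 : hr1.Perm (((kept ++ [e]).map (fun x : Int => -x)).erase m) := by
            have := hperm1.erase m
            simpa [List.erase_cons_head] using this
          have h2 : ((kept ++ [e]).erase M).map (fun x : Int => -x)
              = ((kept ++ [e]).map (fun x : Int => -x)).erase (-M) := by
            exact List.map_erase (fun a b hab => by omega) _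
          rw [h2, ← hmM]
          exact h1
        rw [hM]
        simp only [Option.getD_some]
        rw [hrm]
        have hlen : answer + ((e :: rest').length : Int) = (answer + 1) + (rest'.length : Int) := by
          simp only [List.length_cons]
          push_cast
          ring
        rw [hlen, hmM]
        have htt : total + e + -M = total + e - M := by ring
        rw [htt]
        exact ih (k - 1) (total + e - M) (answer + 1) hr1 ((kept ++ [e]).erase M) hsr1 hperm2
    · rw [if_neg hover, if_neg hover]
      have hlen : answer + ((e :: rest').length : Int) = (answer + 1) + (rest'.length : Int) := by
        simp only [List.length_cons]
        push_cast
        ring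
      rw [hlen]
      exact ih k (total + e) (answer + 1) (heapPush (-e) heap) (kept ++ [e]) hsorted1 hperm1

-- ===== VERDICT (by name: the statement is the Claim_ definition above) =====
theorem solution_spec : Claim_equal_solution := by
  unfold Claim_equal_solution Spec_solution
  intro n k enemy _
  unfold solution solution_alt
  have := loops_eq n enemy k 0 0 [] [] (by simp) (by simp)
  simpa [PySem.List.enumerate] using this
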